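-- pv_equiv track=rewrite | github.com/dkurchigin/yandex_test_me | __main__.py | remove_min_multiplication_of_numbers
-- ===== SOURCE A (Python) =====
-- def remove_min_multiplication_of_numbers(array):
--     mult_min_values = []
--
--     for first_n_index, first_n in enumerate(array):
--         for second_n_index, second_n in enumerate(array):
--             if first_n_index != second_n_index:
--                 try:
--                     if mult_min_values[first_n_index] < first_n * second_n:
--                         mult_min_values[first_n_index] = first_n * second_n
--                 except IndexError:
--                     mult_min_values.append(first_n * second_n)
--
--     min_element_index = mult_min_values.index(min(mult_min_values))
--     array.pop(min_element_index)
--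
--     return array
-- ===== SOURCE B (Python) =====
-- def remove_min_multiplication_of_numbers(array):
--     # One pass finds the top-2 maxima and bottom-2 minima (with the index of the
--     # extreme); each element's best pairwise product then follows from its sign.
--     # Mutates array in place via pop, like the original.
--     def _top2(seq, better):
--         e1 = e2 = None
--         k = -1
--         for i, v in enumerate(seq):
--             if e1 is None or better(v, e1):
--                 e2 = e1
--                 e1 = v
--                 k = i
--             elif e2 is None or better(v, e2):
--                 e2 = v
--         return e1, e2, k
--
--     max1, max2, i1 = _top2(array, lambda x, y: x > y)
--     min1, min2, j1 = _top2(array, lambda x, y: x < y)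
--     best = []
--     for i, v in enumerate(array):
--         mo = max2 if i == i1 else max1
--         no = min2 if i == j1 else min1
--         best.append(v * mo if v >= 0 else v * no)
--     array.pop(best.index(min(best)))
--     return array
-- ===== Notes on version B (the rewrite author's own statement) =====
-- stated objective: faster
-- what changed: Replaces the quadratic all-pairs scan (with its try/except list-growing trick) by a single pass that records the top-2 maxima and bottom-2 minima with the extreme's index, from which each element's best pairwise product follows by its sign.
import Mathlib
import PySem

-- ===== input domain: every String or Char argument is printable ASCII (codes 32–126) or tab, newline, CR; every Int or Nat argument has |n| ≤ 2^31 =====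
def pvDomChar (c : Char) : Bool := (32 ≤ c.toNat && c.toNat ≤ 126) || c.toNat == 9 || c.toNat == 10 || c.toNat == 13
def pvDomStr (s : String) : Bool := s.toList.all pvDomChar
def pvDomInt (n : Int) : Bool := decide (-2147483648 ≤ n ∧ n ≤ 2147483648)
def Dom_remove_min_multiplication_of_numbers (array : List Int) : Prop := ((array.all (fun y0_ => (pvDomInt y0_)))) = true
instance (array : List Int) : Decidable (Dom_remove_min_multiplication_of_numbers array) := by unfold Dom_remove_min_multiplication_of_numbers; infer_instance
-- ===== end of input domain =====

-- B replaces A's O(n^2) all-pairs scan by an O(n) top-2-max / bottom-2-min pass;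
-- like A, the Python B mutates `array` in place (pop); the theorems are about the return value.

-- ===== PORT A =====
-- one step of A's inner loop for row (i, x): 'if second_n_index != i: try: … except IndexError: append'
def pvAStep (i : Int) (x : Int) (l : List Int) (p : Int × Int) : List Int :=
  if p.1 ≠ i then
    match PySem.List.pyGet? l i with          -- mult_min_values[i]; none = IndexError
    | some c => if c < x * p.2 then l.set i.toNat (x * p.2) else l   -- l[i] = x*p.2 (i ≥ 0, in range: exact)
    | none => l ++ [x * p.2]
  else l

def remove_min_multiplication_of_numbers (array : List Int) : List Int :=
  let mmv := (PySem.List.enumerate array).foldl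
    (fun l fp => (PySem.List.enumerate array).foldl (fun l sp => pvAStep fp.1 fp.2 l sp) l) []
  match PySem.List.min? mmv (fun v => v) with   -- min(mult_min_values); none = ValueError, excluded by Pre_
  | none => array
  | some m =>
    match PySem.List.index? mmv m with
    | none => array                              -- unreachable: m ∈ mmv
    | some k =>
      match PySem.List.pop? array (k : Int) with -- array.pop(k)
      | none => array                            -- unreachable: k < length
      | some r => r.2

-- ===== PORT B =====
-- B's helper _top2(seq, better): top two elements under `better` plus the index of the best
def pvTop2Step (better : Int → Int → Bool) (st : Option Int × Option Int × Int) (p : Int × Int) :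
    Option Int × Option Int × Int :=
  match st with
  | (e1, e2, k) =>
    match e1 with
    | none => (some p.2, e2, p.1)
    | some v1 =>
      if better p.2 v1 then (some p.2, some v1, p.1)
      else match e2 with
        | none => (some v1, some p.2, k)
        | some v2 => if better p.2 v2 then (some v1, some p.2, k) else (some v1, some v2, k)

def pvTop2 (seq : List Int) (better : Int → Int → Bool) : Option Int × Option Int × Int :=
  (PySem.List.enumerate seq).foldl (pvTop2Step better) (none, none, -1)

def remove_min_multiplication_of_numbers_alt (array : List Int) : List Int :=
  let t := pvTop2 array (fun x y => decide (x > y))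
  let u := pvTop2 array (fun x y => decide (x < y))
  let best := (PySem.List.enumerate array).foldl
    (fun b p =>
      let mo := if p.1 = t.2.2 then t.2.1 else t.1
      let no := if p.1 = u.2.2 then u.2.1 else u.1
      -- v * mo / v * no; Python raises TypeError when the Option is None — only for len < 2, excluded by Pre_
      b ++ [if 0 ≤ p.2 then p.2 * mo.getD 0 else p.2 * no.getD 0]) []
  match PySem.List.min? best (fun v => v) with
  | none => array
  | some m =>
    match PySem.List.index? best m with
    | none => array
    | some k =>
      match PySem.List.pop? array (k : Int) with
      | none => array
      | some r => r.2

-- ===== PRECONDITION & SPEC =====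
-- A raises (ValueError from min of an empty list) when len(array) < 2; B raises there too.
def Pre_remove_min_multiplication_of_numbers (array : List Int) : Prop := 2 ≤ array.length
instance (array : List Int) : Decidable (Pre_remove_min_multiplication_of_numbers array) := by
  unfold Pre_remove_min_multiplication_of_numbers; infer_instance

def pvWitness_remove_min_multiplication_of_numbers : List Int := [3, -1, 4]

def Spec_remove_min_multiplication_of_numbers (array : List Int) (out : List Int) : Prop := out = remove_min_multiplication_of_numbers_alt array
instance (array : List Int) (out : List Int) : Decidable (Spec_remove_min_multiplication_of_numbers array out) := by unfold Spec_remove_min_multiplication_of_numbers; infer_instance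

-- ===== CLAIM (what is proved, stated in full; the proofs are below) =====
def Claim_equal_remove_min_multiplication_of_numbers : Prop := ∀ (array : List Int), Dom_remove_min_multiplication_of_numbers array → Pre_remove_min_multiplication_of_numbers array → Spec_remove_min_multiplication_of_numbers array (remove_min_multiplication_of_numbers array)


-- ===== LEMMAS AND PROOFS =====

-- ---- shared notions ----
-- running extremum under a strict "better" test (the loop both _top2 and max() run)
def pvExtO (b : Int → Int → Bool) (l : List Int) : Option Int :=
  l.foldl (fun acc y => match acc with | none => some y | some c => if b y c then some y else some c) none

def pvGt : Int → Int → Bool := fun x y => decide (x > y)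

-- the value A's row i computes: max over j ≠ i of x * a[j]
def pvBestI (a : List Int) (i : Nat) (x : Int) : Int :=
  (pvExtO pvGt ((a.eraseIdx i).map (fun y => x * y))).getD 0

-- ---- generic facts about pvExtO ----
lemma pvExtO_aux_some (b : Int → Int → Bool) (l : List Int) (c : Int) :
    ∃ m, l.foldl (fun acc y => match acc with | none => some y | some c => if b y c then some y else some c) (some c) = some m := by
  induction l generalizing c with
  | nil => exact ⟨c, rfl⟩
  | cons y t ih =>
    simp only [List.foldl_cons]
    by_cases hb : b y c <;> simp [hb] <;> [exact ih y; exact ih c]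

lemma pvExtO_ne_nil (b : Int → Int → Bool) (l : List Int) (h : l ≠ []) : ∃ m, pvExtO b l = some m := by
  cases l with
  | nil => exact absurd rfl h
  | cons z t => exact pvExtO_aux_some b t z

lemma pvExtO_append (b : Int → Int → Bool) (l : List Int) (y : Int) :
    pvExtO b (l ++ [y]) = some (match pvExtO b l with | none => y | some c => if b y c then y else c) := by
  unfold pvExtO
  rw [List.foldl_append]
  cases h : List.foldl (fun acc y => match acc with | none => some y | some c => if b y c then some y else some c) none l with
  | none => rfl
  | some c => by_cases hb : b y c <;> simp [hb]

lemma pvExtO_mem (b : Int → Int → Bool) (l : List Int) (m : Int) (h : pvExtO b l = some m) : m ∈ l := by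
  have aux : ∀ (t : List Int) (c m : Int),
      t.foldl (fun acc y => match acc with | none => some y | some c => if b y c then some y else some c) (some c) = some m → m = c ∨ m ∈ t := by
    intro t
    induction t with
    | nil => intro c m hm; left; cases hm; rfl
    | cons y tt ih =>
      intro c m hm
      simp only [List.foldl_cons] at hm
      by_cases hb : b y c
      · simp only [hb, if_pos] at hm
        rcases ih y m hm with h' | h' <;> simp [h']
      · simp only [hb] at hm
        rcases ih c m hm with h' | h' <;> simp [h']
  cases l with
  | nil => cases h
  | cons z t =>
    rcases aux t z m h with h' | h' <;> simp [h']

lemma pvExtO_ub (b : Int → Int → Bool)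
    (hIrr : ∀ x, b x x = false)
    (hT : ∀ x y z, b x y = true → b y z = true → b x z = true)
    (hA : ∀ x y z, b x y = true → b z y = false → b x z = true)
    (l : List Int) (m : Int) (h : pvExtO b l = some m) : ∀ z ∈ l, b z m = false := by
  have aux : ∀ (t : List Int) (c m : Int),
      t.foldl (fun acc y => match acc with | none => some y | some c => if b y c then some y else some c) (some c) = some m →
      b c m = false ∧ ∀ z ∈ t, b z m = false := by
    intro t
    induction t with
    | nil =>
      intro c m hm; cases hm
      exact ⟨hIrr c, by simp⟩
    | cons y tt ih =>
      intro c m hm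
      simp only [List.foldl_cons] at hm
      by_cases hb : b y c
      · simp only [hb, if_pos] at hm
        rcases ih y m hm with ⟨hy, hrest⟩
        have hc : b c m = false := by
          by_contra hcm
          have hcm' : b c m = true := by revert hcm; cases b c m <;> simp
          have := hT y c m hb hcm'
          rw [this] at hy; cases hy
        refine ⟨hc, ?_⟩
        intro z hz
        rcases List.mem_cons.mp hz with rfl | hz'
        · exact hy
        · exact hrest z hz'
      · have hb' : b y c = false := by revert hb; cases b y c <;> simp
        simp only [hb'] at hm
        rcases ih c m hm with ⟨hc, hrest⟩
        refine ⟨hc, ?_⟩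
        intro z hz
        rcases List.mem_cons.mp hz with rfl | hz'
        · by_contra hzm
          have hzm' : b z m = true := by revert hzm; cases b z m <;> simp
          have := hA z m c hzm' hc
          rw [this] at hb'; cases hb'
        · exact hrest z hz'
  intro z hz
  cases l with
  | nil => cases h
  | cons w t =>
    rcases aux t w m h with ⟨hw, hrest⟩
    rcases List.mem_cons.mp hz with rfl | hz'
    · exact hw
    · exact hrest z hz'

-- ---- the _top2 invariant (B side) ----
def pvInv (b : Int → Int → Bool) (p : List Int) (st : Option Int × Option Int × Int) : Prop :=
  (p = [] ∧ st = (none, none, -1)) ∨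
  (0 ≤ st.2.2 ∧ st.2.2.toNat < p.length ∧ st.1 = pvExtO b p ∧
   ∀ i : Nat, i < p.length → (if (i : Int) = st.2.2 then st.2.1 else st.1) = pvExtO b (p.eraseIdx i))

-- keeping the best: the state (best, updated second-best, same index) stays invariant
lemma pvInv_keep (b : Int → Int → Bool)
    (p : List Int) (y v1 : Int) (k : Int) (w0 w : Option Int)
    (hv1 : pvExtO b p = some v1) (hb' : b y v1 = false)
    (hk0 : 0 ≤ k) (hklt : k.toNat < p.length)
    (hall : ∀ i : Nat, i < p.length → (if (i : Int) = k then w0 else some v1) = pvExtO b (p.eraseIdx i))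
    (hw : w = some (match w0 with | none => y | some v2 => if b y v2 then y else v2)) :
    pvInv b (p ++ [y]) (some v1, w, k) := by
  right
  refine ⟨hk0, by simp; omega, ?_, ?_⟩
  · rw [pvExtO_append, hv1]; simp [hb']
  · intro i hi
    simp only [List.length_append, List.length_cons, List.length_nil] at hi
    by_cases hip : i = p.length
    · subst hip
      have hne : ((p.length : Int)) ≠ k := by omega
      rw [if_neg hne, List.eraseIdx_append_of_length_le (le_refl _)]
      simpa using hv1.symm
    · have hilt : i < p.length := by omega
      have hstep := hall i hilt
      rw [List.eraseIdx_append_of_lt_length hilt, pvExtO_append, ← hstep]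
      by_cases hik : ((i : Int)) = k
      · rw [if_pos hik, if_pos hik, hw]
        cases w0 with
        | none => rfl
        | some v2 => rfl
      · rw [if_neg hik, if_neg hik]
        simp [hb']

lemma pvInv_step (b : Int → Int → Bool)
    (hIrr : ∀ x, b x x = false)
    (hT : ∀ x y z, b x y = true → b y z = true → b x z = true)
    (hA : ∀ x y z, b x y = true → b z y = false → b x z = true)
    (p : List Int) (y : Int) (st : Option Int × Option Int × Int)
    (h : pvInv b p st) : pvInv b (p ++ [y]) (pvTop2Step b st ((p.length : Int), y)) := by
  obtain ⟨e1, e2, k⟩ := st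
  rcases h with ⟨hp, hst⟩ | ⟨hk0, hklt, he1, hall⟩
  · subst hp
    cases hst
    have hred : pvTop2Step b (none, none, -1) (((([] : List Int).length : Nat) : Int), y)
        = (some y, none, 0) := rfl
    rw [hred]
    right
    refine ⟨le_refl 0, by simp, by simp [pvExtO], ?_⟩
    intro i hi
    simp only [List.nil_append, List.length_cons, List.length_nil] at hi
    have : i = 0 := by omega
    subst this
    simp [pvExtO]
  · dsimp only at hk0 hklt he1 hall
    have hne : p ≠ [] := by
      intro h0; rw [h0] at hklt; simp at hklt
    obtain ⟨v1, hv1⟩ := pvExtO_ne_nil b p hne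
    subst he1
    rw [hv1] at hall ⊢
    by_cases hb : b y v1
    · -- new best: state becomes (some y, some v1, p.length)
      simp only [pvTop2Step, hb, if_pos]
      right
      refine ⟨Int.natCast_nonneg _, by simp, ?_, ?_⟩
      · rw [pvExtO_append, hv1]; simp [hb]
      · intro i hi
        simp only [List.length_append, List.length_cons, List.length_nil] at hi
        by_cases hip : i = p.length
        · subst hip
          rw [if_pos rfl, List.eraseIdx_append_of_length_le (le_refl _)]
          simpa using hv1.symm
        · have hilt : i < p.length := by omega
          have hcne : ((i : Int)) ≠ (p.length : Int) := by
            intro hcast; exact hip (by exact_mod_cast hcast)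
          rw [if_neg hcne, List.eraseIdx_append_of_lt_length hilt, pvExtO_append]
          cases hmi : pvExtO b (p.eraseIdx i) with
          | none => rfl
          | some mi =>
            have hmem : mi ∈ p := List.mem_of_mem_eraseIdx (pvExtO_mem b _ _ hmi)
            have hfalse : b mi v1 = false := pvExtO_ub b hIrr hT hA p v1 hv1 mi hmem
            have : b y mi = true := hA y v1 mi hb hfalse
            simp [this]
    · -- not better than the best: best and its index stay, second best updates
      have hb' : b y v1 = false := by revert hb; cases b y v1 <;> simp
      have hall' : ∀ i : Nat, i < p.length → (if (i : Int) = k then e2 else some v1) = pvExtO b (p.eraseIdx i) := hall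
      cases e2 with
      | none =>
        simp only [pvTop2Step, hb', Bool.false_eq_true]
        exact pvInv_keep b p y v1 k none _ hv1 hb' hk0 hklt hall' rfl
      | some v2 =>
        by_cases hb2 : b y v2
        · simp only [pvTop2Step, hb', hb2, Bool.false_eq_true, if_pos]
          exact pvInv_keep b p y v1 k (some v2) _ hv1 hb' hk0 hklt hall' (by simp [hb2])
        · simp only [pvTop2Step, hb', hb2, Bool.false_eq_true]
          exact pvInv_keep b p y v1 k (some v2) _ hv1 hb' hk0 hklt hall' (by simp [hb2])

lemma pvInv_fold (b : Int → Int → Bool)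
    (hIrr : ∀ x, b x x = false)
    (hT : ∀ x y z, b x y = true → b y z = true → b x z = true)
    (hA : ∀ x y z, b x y = true → b z y = false → b x z = true) :
    ∀ (t p : List Int) (st : Option Int × Option Int × Int), pvInv b p st →
      pvInv b (p ++ t) ((PySem.List.enumerate t (p.length : Int)).foldl (pvTop2Step b) st) := by
  intro t
  induction t with
  | nil =>
    intro p st h
    simpa [PySem.List.enumerate] using h
  | cons y tt ih =>
    intro p st h
    rw [PySem.List.enumerate_cons, List.foldl_cons]
    have h1 := pvInv_step b hIrr hT hA p y st h
    have h2 := ih (p ++ [y]) _ h1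
    have hcast : (((p ++ [y]).length : Nat) : Int) = (p.length : Int) + 1 := by
      simp
    rw [hcast] at h2
    simpa using h2

lemma pvTop2_inv (b : Int → Int → Bool)
    (hIrr : ∀ x, b x x = false)
    (hT : ∀ x y z, b x y = true → b y z = true → b x z = true)
    (hA : ∀ x y z, b x y = true → b z y = false → b x z = true)
    (a : List Int) : pvInv b a (pvTop2 a b) := by
  have hbase : pvInv b [] (none, none, -1) := Or.inl ⟨rfl, rfl⟩
  have := pvInv_fold b hIrr hT hA a [] (none, none, -1) hbase
  simpa [pvTop2] using this

-- ---- A side: the inner loop of row (i, x) ----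
def pvG (i x : Int) (c : Int) (p : Int × Int) : Int :=
  if p.1 ≠ i then (if c < x * p.2 then x * p.2 else c) else c

def pvRowVal (i x : Int) : List (Int × Int) → Option Int
  | [] => none
  | p :: rest => if p.1 = i then pvRowVal i x rest else some (rest.foldl (pvG i x) (x * p.2))

lemma pvIf_max (c z : Int) : (if c < z then z else c) = max c z := by
  by_cases h : c < z
  · rw [if_pos h, max_eq_right h.le]
  · rw [if_neg h, max_eq_left (not_lt.mp h)]

lemma pvA_phase1 (i : Nat) (x : Int) :
    ∀ (ps : List (Int × Int)) (l : List Int) (c : Int), l.length = i →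
      ps.foldl (fun l sp => pvAStep (i : Int) x l sp) (l ++ [c]) = l ++ [ps.foldl (pvG (i : Int) x) c] := by
  intro ps
  induction ps with
  | nil => intro l c hl; rfl
  | cons p rest ih =>
    intro l c hl
    simp only [List.foldl_cons]
    by_cases hp1 : p.1 = (i : Int)
    · simp only [pvAStep, pvG, hp1, ne_eq, not_true_eq_false, ite_false]
      exact ih l c hl
    · have hget : PySem.List.pyGet? (l ++ [c]) (i : Int) = some c := by
        rw [PySem.List.pyGet?_natCast, List.getElem?_append_right (by omega)]
        simp [hl]
      simp only [pvAStep, pvG, hp1, ne_eq, not_false_eq_true, if_pos, hget]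
      by_cases hlt : c < x * p.2
      · have hset : (l ++ [c]).set ((i : Int)).toNat (x * p.2) = l ++ [x * p.2] := by
          have : ((i : Int)).toNat = l.length := by omega
          rw [this, List.set_append]
          simp
        rw [if_pos hlt, if_pos hlt, hset]
        exact ih l (x * p.2) hl
      · rw [if_neg hlt, if_neg hlt]
        exact ih l c hl

lemma pvA_phase0 (i : Nat) (x : Int) :
    ∀ (ps : List (Int × Int)) (l : List Int), l.length = i →
      ps.foldl (fun l sp => pvAStep (i : Int) x l sp) l = l ++ (pvRowVal (i : Int) x ps).toList := by
  intro ps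
  induction ps with
  | nil => intro l hl; simp [pvRowVal]
  | cons p rest ih =>
    intro l hl
    simp only [List.foldl_cons]
    by_cases hp1 : p.1 = (i : Int)
    · have hstep : pvAStep ((i : Nat) : Int) x l p = l := by
        simp [pvAStep, hp1]
      rw [hstep, ih l hl]
      simp [pvRowVal, hp1]
    · have hget : PySem.List.pyGet? l (i : Int) = none := by
        rw [PySem.List.pyGet?_natCast, List.getElem?_eq_none_iff]
        omega
      have hstep : pvAStep ((i : Nat) : Int) x l p = l ++ [x * p.2] := by
        simp [pvAStep, hp1, hget]
      rw [hstep, pvA_phase1 i x rest l (x * p.2) hl]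
      simp [pvRowVal, hp1]

-- folding pvG over an enumerate segment whose indices all differ from i
lemma pvGF0 (i x : Int) : ∀ (a : List Int) (s c : Int), i < s →
    (PySem.List.enumerate a s).foldl (pvG i x) c = (a.map (fun y => x * y)).foldl max c := by
  intro a
  induction a with
  | nil => intro s c _; simp [PySem.List.enumerate]
  | cons y t ih =>
    intro s c hs
    rw [PySem.List.enumerate_cons, List.foldl_cons, List.map_cons, List.foldl_cons]
    have hne : (s ≠ i) := by omega
    simp only [pvG, hne, ne_eq, not_false_eq_true, if_pos, pvIf_max]
    exact ih (s + 1) (max c (x * y)) (by omega)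

lemma pvGF1 (i x : Int) : ∀ (a : List Int) (s c : Int), s ≤ i →
    (PySem.List.enumerate a s).foldl (pvG i x) c
      = ((a.eraseIdx (i - s).toNat).map (fun y => x * y)).foldl max c := by
  intro a
  induction a with
  | nil => intro s c _; simp [PySem.List.enumerate]
  | cons y t ih =>
    intro s c hs
    rw [PySem.List.enumerate_cons, List.foldl_cons]
    by_cases hsi : s = i
    · have h0 : ((i - s : Int)).toNat = 0 := by omega
      have hEq : ¬ ((s : Int) ≠ i) := by omega
      simp only [pvG, hEq, ite_false, h0, List.eraseIdx_cons_zero]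
      exact pvGF0 i x t (s + 1) c (by omega)
    · have hne : ((s : Int)) ≠ i := hsi
      simp only [pvG, hne, ne_eq, not_false_eq_true, if_pos, pvIf_max]
      have hsucc : ((i - s : Int)).toNat = ((i - (s + 1) : Int)).toNat + 1 := by omega
      rw [hsucc, List.eraseIdx_cons_succ, List.map_cons, List.foldl_cons]
      exact ih (s + 1) (max c (x * y)) (by omega)

lemma pvExtO_gt_cons (z : Int) (t : List Int) : pvExtO pvGt (z :: t) = some (t.foldl max z) := by
  have aux : ∀ (t : List Int) (z : Int),
      t.foldl (fun acc y => match acc with | none => some y | some c => if pvGt y c then some y else some c) (some z) = some (t.foldl max z) := by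
    intro t
    induction t with
    | nil => intro z; rfl
    | cons y tt ih =>
      intro z
      simp only [List.foldl_cons]
      by_cases h : pvGt y z <;> simp only [h, if_pos, Bool.false_eq_true, ite_false]
      · rw [ih y, show max z y = y from by simp [pvGt] at h; omega]
      · rw [ih z, show max z y = z from by simp [pvGt] at h; omega]
  unfold pvExtO
  rw [List.foldl_cons]
  exact aux t z

lemma pvRowVal_lt (i x : Int) : ∀ (a : List Int) (s : Int), i < s →
    pvRowVal i x (PySem.List.enumerate a s) = pvExtO pvGt (a.map (fun y => x * y)) := by
  intro a
  induction a with
  | nil => intro s _; simp [PySem.List.enumerate, pvRowVal, pvExtO]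
  | cons y t ih =>
    intro s hs
    rw [PySem.List.enumerate_cons]
    have hne : ((s : Int)) ≠ i := by omega
    simp only [pvRowVal, hne, ite_false]
    rw [pvGF0 i x t (s + 1) (x * y) (by omega), List.map_cons, pvExtO_gt_cons]

lemma pvRowVal_spec (i x : Int) : ∀ (a : List Int) (s : Int), s ≤ i → i < s + a.length →
    pvRowVal i x (PySem.List.enumerate a s)
      = pvExtO pvGt (((a.eraseIdx (i - s).toNat).map (fun y => x * y))) := by
  intro a
  induction a with
  | nil => intro s h1 h2; simp at h2; omega
  | cons y t ih =>
    intro s h1 h2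
    rw [PySem.List.enumerate_cons]
    by_cases hsi : s = i
    · simp only [pvRowVal, hsi, if_pos]
      have h0 : ((i - i : Int)).toNat = 0 := by omega
      rw [h0, List.eraseIdx_cons_zero]
      exact pvRowVal_lt i x t (i + 1) (by omega)
    · have hne : ((s : Int)) ≠ i := hsi
      simp only [pvRowVal, hne, ite_false]
      rw [pvGF1 i x t (s + 1) (x * y) (by omega)]
      have hsucc : ((i - s : Int)).toNat = ((i - (s + 1) : Int)).toNat + 1 := by omega
      rw [hsucc, List.eraseIdx_cons_succ, List.map_cons, pvExtO_gt_cons]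

lemma pvA_outer (a : List Int) (h2 : 2 ≤ a.length) :
    ∀ (t : List Int) (m : Nat) (l : List Int), t = a.drop m → l.length = m →
      (PySem.List.enumerate t (m : Int)).foldl
        (fun l fp => (PySem.List.enumerate a).foldl (fun l sp => pvAStep fp.1 fp.2 l sp) l) l
      = l ++ (PySem.List.enumerate t (m : Int)).map (fun p => pvBestI a p.1.toNat p.2) := by
  intro t
  induction t with
  | nil => intro m l _ _; simp [PySem.List.enumerate]
  | cons y tt ih =>
    intro m l ht hl
    have hm : m < a.length := by
      by_contra hge
      rw [List.drop_eq_nil_of_le (by omega)] at ht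
      cases ht
    have htt : tt = a.drop (m + 1) := by
      rw [← List.tail_drop, ← ht]
      rfl
    rw [PySem.List.enumerate_cons, List.foldl_cons, List.map_cons]
    have hrow := pvA_phase0 m y (PySem.List.enumerate a) l hl
    have hspec := pvRowVal_spec ((m : Nat) : Int) y a 0 (by omega) (by omega)
    have hidx : (((m : Nat) : Int) - 0).toNat = m := by omega
    rw [hidx] at hspec
    have hnil : (a.eraseIdx m).map (fun z => y * z) ≠ [] := by
      have hlen_e : (a.eraseIdx m).length = a.length - 1 := by
        rw [List.length_eraseIdx]
        simp [hm]
      intro h0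
      have h1 := congrArg List.length h0
      rw [List.length_map, hlen_e] at h1
      simp at h1
      omega
    obtain ⟨v, hv⟩ := pvExtO_ne_nil pvGt _ hnil
    have hbest : pvBestI a (((m : Nat) : Int)).toNat y = v := by
      unfold pvBestI
      rw [show ((((m : Nat) : Int)).toNat) = m from by omega, hv]
      rfl
    have hhead : (PySem.List.enumerate a).foldl
        (fun l sp => pvAStep (((m : Nat) : Int), y).1 (((m : Nat) : Int), y).2 l sp) l = l ++ [v] := by
      simp only
      rw [hrow, hspec, hv]
      rfl
    rw [hhead]
    have hlen : (l ++ [v]).length = m + 1 := by simp [hl]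
    have hih := ih (m + 1) (l ++ [v]) htt hlen
    have hcast : (((m + 1 : Nat)) : Int) = ((m : Nat) : Int) + 1 := by push_cast; ring
    rw [hcast] at hih
    rw [hih, hbest]
    simp

-- ---- sign lemmas ----
lemma pvFold_max_mul_nonneg (x : Int) (hx : 0 ≤ x) :
    ∀ (t : List Int) (z : Int), (t.map (fun y => x * y)).foldl max (x * z) = x * t.foldl max z := by
  intro t
  induction t with
  | nil => intro z; rfl
  | cons y tt ih =>
    intro z
    rw [List.map_cons, List.foldl_cons, List.foldl_cons]
    have hmul : max (x * z) (x * y) = x * max z y := by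
      rcases le_total z y with h | h
      · rw [max_eq_right h, max_eq_right (by exact mul_le_mul_of_nonneg_left h hx)]
      · rw [max_eq_left h, max_eq_left (by exact mul_le_mul_of_nonneg_left h hx)]
    rw [hmul]
    exact ih (max z y)

lemma pvFold_max_mul_neg (x : Int) (hx : x < 0) :
    ∀ (t : List Int) (z : Int), (t.map (fun y => x * y)).foldl max (x * z) = x * t.foldl min z := by
  intro t
  induction t with
  | nil => intro z; rfl
  | cons y tt ih =>
    intro z
    rw [List.map_cons, List.foldl_cons, List.foldl_cons]
    have hmul : max (x * z) (x * y) = x * min z y := by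
      rcases le_total z y with h | h
      · rw [min_eq_left h, max_eq_left (by exact mul_le_mul_of_nonpos_left h hx.le)]
      · rw [min_eq_right h, max_eq_right (by exact mul_le_mul_of_nonpos_left h hx.le)]
    rw [hmul]
    exact ih (min z y)

lemma pvExtO_lt_cons (z : Int) (t : List Int) :
    pvExtO (fun x y => decide (x < y)) (z :: t) = some (t.foldl min z) := by
  have aux : ∀ (t : List Int) (z : Int),
      t.foldl (fun acc y => match acc with | none => some y | some c => if (decide (y < c) : Bool) then some y else some c) (some z) = some (t.foldl min z) := by
    intro t
    induction t with
    | nil => intro z; rfl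
    | cons y tt ih =>
      intro z
      simp only [List.foldl_cons]
      by_cases h : y < z
      · simp only [h, decide_true, if_pos]
        rw [ih y, min_eq_right h.le]
      · simp only [h, decide_false, Bool.false_eq_true, ite_false]
        rw [ih z, min_eq_left (not_lt.mp h)]
  unfold pvExtO
  rw [List.foldl_cons]
  exact aux t z

-- ---- enumerate membership ----
lemma pvMem_enumerate : ∀ (l : List Int) (s : Int) (p : Int × Int), p ∈ PySem.List.enumerate l s →
    ∃ k : Nat, ∃ hk : k < l.length, p.1 = s + (k : Int) ∧ p.2 = l[k] := by
  intro l
  induction l with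
  | nil => intro s p hp; simp [PySem.List.enumerate] at hp
  | cons y t ih =>
    intro s p hp
    rw [PySem.List.enumerate_cons] at hp
    rcases List.mem_cons.mp hp with rfl | hp'
    · exact ⟨0, by simp, by simp, by simp⟩
    · obtain ⟨k, hk, h1, h2⟩ := ih (s + 1) p hp'
      refine ⟨k + 1, by simpa using hk, ?_, by simpa using h2⟩
      rw [h1]
      push_cast
      ring

-- ---- the common tail (min / index / pop); both ports end with this code ----
def pvTail (mmv : List Int) (array : List Int) : List Int :=
  match PySem.List.min? mmv (fun v => v) with
  | none => array
  | some m =>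
    match PySem.List.index? mmv m with
    | none => array
    | some k =>
      match PySem.List.pop? array (k : Int) with
      | none => array
      | some r => r.2

lemma pvA_eq_tail (a : List Int) :
    remove_min_multiplication_of_numbers a
      = pvTail ((PySem.List.enumerate a).foldl
          (fun l fp => (PySem.List.enumerate a).foldl (fun l sp => pvAStep fp.1 fp.2 l sp) l) []) a := rfl

lemma pvB_eq_tail (a : List Int) :
    remove_min_multiplication_of_numbers_alt a
      = pvTail ((PySem.List.enumerate a).foldl
          (fun b p =>
            let mo := if p.1 = (pvTop2 a (fun x y => decide (x > y))).2.2 then (pvTop2 a (fun x y => decide (x > y))).2.1 else (pvTop2 a (fun x y => decide (x > y))).1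
            let no := if p.1 = (pvTop2 a (fun x y => decide (x < y))).2.2 then (pvTop2 a (fun x y => decide (x < y))).2.1 else (pvTop2 a (fun x y => decide (x < y))).1
            b ++ [if 0 ≤ p.2 then p.2 * mo.getD 0 else p.2 * no.getD 0]) []) a := rfl

lemma pvLists_eq (a : List Int) (h2 : 2 ≤ a.length) :
    (PySem.List.enumerate a).foldl
        (fun l fp => (PySem.List.enumerate a).foldl (fun l sp => pvAStep fp.1 fp.2 l sp) l) []
      = (PySem.List.enumerate a).foldl
          (fun b p =>
            let mo := if p.1 = (pvTop2 a (fun x y => decide (x > y))).2.2 then (pvTop2 a (fun x y => decide (x > y))).2.1 else (pvTop2 a (fun x y => decide (x > y))).1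
            let no := if p.1 = (pvTop2 a (fun x y => decide (x < y))).2.2 then (pvTop2 a (fun x y => decide (x < y))).2.1 else (pvTop2 a (fun x y => decide (x < y))).1
            b ++ [if 0 ≤ p.2 then p.2 * mo.getD 0 else p.2 * no.getD 0]) [] := by
  have hA := pvA_outer a h2 a 0 [] (by rw [List.drop_zero]) rfl
  rw [Nat.cast_zero, List.nil_append] at hA
  rw [hA]
  have hB := PySem.List.foldl_append_singleton_eq_map
    (fun p : Int × Int =>
      if 0 ≤ p.2 then
        p.2 * (if p.1 = (pvTop2 a (fun x y => decide (x > y))).2.2 then (pvTop2 a (fun x y => decide (x > y))).2.1 else (pvTop2 a (fun x y => decide (x > y))).1).getD 0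
      else
        p.2 * (if p.1 = (pvTop2 a (fun x y => decide (x < y))).2.2 then (pvTop2 a (fun x y => decide (x < y))).2.1 else (pvTop2 a (fun x y => decide (x < y))).1).getD 0)
    (PySem.List.enumerate a) []
  rw [List.nil_append] at hB
  refine Eq.trans (List.map_congr_left ?_) hB.symm
  intro p hp
  obtain ⟨k, hk, h1, h2p⟩ := pvMem_enumerate a 0 p hp
  obtain ⟨p1, p2⟩ := p
  simp only [zero_add] at h1 h2p
  subst h1
  subst h2p
  have hane : a ≠ [] := by
    intro h0
    rw [h0] at h2
    simp at h2
  rcases pvTop2_inv (fun x y : Int => decide (x > y))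
      (by intro x; simp)
      (by intro x y z hxy hyz; simp at *; omega)
      (by intro x y z hxy hzy; simp at *; omega) a with ⟨h0, _⟩ | ⟨_, _, _, hallG⟩
  · exact absurd h0 hane
  rcases pvTop2_inv (fun x y : Int => decide (x < y))
      (by intro x; simp)
      (by intro x y z hxy hyz; simp at *; omega)
      (by intro x y z hxy hzy; simp at *; omega) a with ⟨h0, _⟩ | ⟨_, _, _, hallL⟩
  · exact absurd h0 hane
  have hmoG := hallG k hk
  have hmoL := hallL k hk
  simp only
  rw [hmoG, hmoL, Int.toNat_natCast]
  cases he : a.eraseIdx k with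
  | nil =>
    exfalso
    have hlen_e := congrArg List.length he
    rw [List.length_eraseIdx] at hlen_e
    simp [hk] at hlen_e
    omega
  | cons z t =>
    unfold pvBestI
    rw [he, List.map_cons, pvExtO_gt_cons]
    have hgt : (fun x y : Int => decide (x > y)) = pvGt := rfl
    rw [hgt, pvExtO_gt_cons, pvExtO_lt_cons]
    by_cases hx : 0 ≤ a[k]
    · rw [if_pos hx]
      simp only [Option.getD_some]
      exact pvFold_max_mul_nonneg _ hx t z
    · rw [if_neg hx]
      simp only [Option.getD_some]
      exact pvFold_max_mul_neg _ (by omega) t z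

-- ===== VERDICT (by name: the statement is the Claim_ definition above) =====
theorem remove_min_multiplication_of_numbers_spec : Claim_equal_remove_min_multiplication_of_numbers := by
  intro a _hdom hpre
  show _ = _
  rw [pvA_eq_tail, pvB_eq_tail, pvLists_eq a hpre]
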